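-- pv_equiv track=rewrite | github.com/Cs-Student/nlp | asm02/asm02_3.py | word_tags
-- ===== SOURCE A (Python) =====
-- def word_tags(train_list,test_list):
--     word_tags_dict = {}
--     for sen in train_list:
--         for (word,tag) in sen:
--             wrd = word.lower()
--             if wrd not in word_tags_dict:
--                 word_tags_dict[wrd] = []
--             if tag not in word_tags_dict[wrd]:
--                 word_tags_dict[wrd].append(tag)
--
--
--     for sen in test_list:
--         for (word,tag) in sen:
--             wrd = word.lower()
--             if wrd not in word_tags_dict:
--                 word_tags_dict[wrd] = []
--             if tag not in word_tags_dict[wrd]: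
--                 word_tags_dict[wrd].append(tag)
--     return word_tags_dict
-- ===== SOURCE B (Python) =====
-- def word_tags(train_list, test_list):
--     # One flat list of (lowercased word, tag) pairs, train then test.
--     pairs = [(word.lower(), tag) for sen in train_list + test_list for (word, tag) in sen]
--     # For each distinct word (first-appearance order), scan the pair list for its distinct tags.
--     result = {}
--     for w in dict.fromkeys(w for w, _ in pairs):
--         tags = []
--         for w2, t in pairs:
--             if w2 == w and t not in tags:
--                 tags.append(t)
--         result[w] = tags
--     return result
-- ===== Notes on version B (the rewrite author's own statement) =====
-- stated objective: alternative
-- what changed: A scans once, maintaining a dict and deduplicating tags inline as it goes; B first flattens both lists into one list of (lowercased word, tag) pairs, then for each distinct word (first-appearance order, via dict.fromkeys) re-scans that flat list to gather its distinct tags - no dict is threaded through the scan.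
import Mathlib
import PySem

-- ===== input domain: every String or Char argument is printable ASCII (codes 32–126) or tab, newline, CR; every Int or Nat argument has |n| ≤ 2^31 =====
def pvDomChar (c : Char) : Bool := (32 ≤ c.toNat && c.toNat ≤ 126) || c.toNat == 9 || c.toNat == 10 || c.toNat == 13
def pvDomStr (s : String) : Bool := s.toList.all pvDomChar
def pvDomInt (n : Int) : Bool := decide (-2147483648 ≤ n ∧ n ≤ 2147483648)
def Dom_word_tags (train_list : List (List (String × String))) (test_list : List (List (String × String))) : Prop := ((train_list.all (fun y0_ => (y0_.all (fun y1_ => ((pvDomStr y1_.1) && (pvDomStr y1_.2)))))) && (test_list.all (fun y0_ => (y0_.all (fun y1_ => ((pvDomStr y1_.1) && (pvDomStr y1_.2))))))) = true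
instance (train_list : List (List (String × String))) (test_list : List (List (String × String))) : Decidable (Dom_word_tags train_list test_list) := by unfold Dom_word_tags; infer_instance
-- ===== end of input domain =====

-- B replaces A's single dict-threading scan with: flatten to one lowercased pair list, then for
-- each distinct word re-scan that list for its distinct tags (objective: alternative structure).

-- ===== PORT A =====
-- one (word, tag) step of A's inner loops: ensure key, then append tag if new
def wtStepA (d : PySem.Dict String (List String)) (p : String × String) : PySem.Dict String (List String) :=
  let wrd := PySem.Str.lower p.1
  let d1 := if d.contains wrd then d else d.insert wrd []
  let cur := d1.getD wrd []
  if p.2 ∈ cur then d1 else d1.insert wrd (cur ++ [p.2])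

def word_tags (train_list : List (List (String × String))) (test_list : List (List (String × String))) : List (String × List String) :=
  let d := train_list.foldl (fun d sen => sen.foldl wtStepA d) PySem.Dict.empty
  let d := test_list.foldl (fun d sen => sen.foldl wtStepA d) d
  d.items

-- ===== PORT B =====
-- inner loop of B: distinct tags of word w, scanning the flat pair list
def wtCollect (w : String) (pairs : List (String × String)) : List String :=
  pairs.foldl (fun tags q => if q.1 = w ∧ q.2 ∉ tags then tags ++ [q.2] else tags) []

def word_tags_alt (train_list : List (List (String × String))) (test_list : List (List (String × String))) : List (String × List String) :=
  let pairs := (train_list ++ test_list).flatten.map (fun p => (PySem.Str.lower p.1, p.2))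
  (PySem.List.dedup (pairs.map Prod.fst)).map (fun w => (w, wtCollect w pairs))

-- ===== PRECONDITION & SPEC =====
def Spec_word_tags (train_list : List (List (String × String))) (test_list : List (List (String × String))) (out : List (String × List String)) : Prop := out = word_tags_alt train_list test_list
instance (train_list : List (List (String × String))) (test_list : List (List (String × String))) (out : List (String × List String)) : Decidable (Spec_word_tags train_list test_list out) := by unfold Spec_word_tags; infer_instance

-- ===== CLAIM =====
def Claim_equal_word_tags : Prop := ∀ (train_list : List (List (String × String))) (test_list : List (List (String × String))), Dom_word_tags train_list test_list → Spec_word_tags train_list test_list (word_tags train_list test_list)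

-- ===== LEMMAS AND PROOFS =====

-- A's step on an already-lowered pair (wtStepA lowers first, so they coincide after mapping)
def wtStepL (d : PySem.Dict String (List String)) (p : String × String) : PySem.Dict String (List String) :=
  let d1 := if d.contains p.1 then d else d.insert p.1 []
  let cur := d1.getD p.1 []
  if p.2 ∈ cur then d1 else d1.insert p.1 (cur ++ [p.2])

-- B's closed-form result on a flat lowered pair list
def wtC (L : List (String × String)) : List (String × List String) :=
  (PySem.List.dedup (L.map Prod.fst)).map (fun w => (w, wtCollect w L))

theorem foldA_lower (ps : List (String × String)) (d : PySem.Dict String (List String)) :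
    ps.foldl wtStepA d = (ps.map (fun p => (PySem.Str.lower p.1, p.2))).foldl wtStepL d := by
  induction ps generalizing d with
  | nil => rfl
  | cons p rest ih => simp only [List.foldl_cons, List.map_cons]; exact ih _

theorem foldl_sen_flatten (f : PySem.Dict String (List String) → (String × String) → PySem.Dict String (List String))
    (ls : List (List (String × String))) (d : PySem.Dict String (List String)) :
    ls.foldl (fun d sen => sen.foldl f d) d = ls.flatten.foldl f d := by
  induction ls generalizing d with
  | nil => rfl
  | cons s rest ih => simp [List.foldl_cons, ih, List.flatten, List.foldl_append]

theorem wtCollect_snoc (w : String) (L : List (String × String)) (p : String × String) :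
    wtCollect w (L ++ [p]) =
      if p.1 = w ∧ p.2 ∉ wtCollect w L then wtCollect w L ++ [p.2] else wtCollect w L := by
  simp only [wtCollect, List.foldl_append, List.foldl_cons, List.foldl_nil]

theorem wtFoldl_id (w : String) (L : List (String × String)) :
    w ∉ L.map Prod.fst →
      ∀ acc, L.foldl (fun tags q => if q.1 = w ∧ q.2 ∉ tags then tags ++ [q.2] else tags) acc = acc := by
  induction L with
  | nil => intro _ acc; rfl
  | cons q rest ih =>
    intro h acc
    have hq : ¬ q.1 = w := fun he => h (by simp [List.map_cons, he])
    have h' : w ∉ rest.map Prod.fst := fun hm => h (by simp [List.map_cons, hm])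
    simp only [List.foldl_cons, if_neg (by tauto : ¬ (q.1 = w ∧ q.2 ∉ acc))]
    exact ih h' acc

theorem wtCollect_eq_nil (w : String) (L : List (String × String)) (h : w ∉ L.map Prod.fst) :
    wtCollect w L = [] := wtFoldl_id w L h []

theorem get?_mk_map (xs : List String) (f : String → List String) (w : String) :
    (PySem.Dict.mk (xs.map (fun x => (x, f x)))).get? w =
      if w ∈ xs then some (f w) else none := by
  induction xs with
  | nil => rfl
  | cons x rest ih =>
    simp only [List.map_cons, PySem.Dict.get?_mk_cons]
    by_cases hx : x = w
    · subst hx; simp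
    · rw [if_neg (by simpa using hx), ih]
      simp [List.mem_cons, Ne.symm hx]

theorem dedup_snoc_mem (K : List String) (w : String) (h : w ∈ K) :
    PySem.List.dedup (K ++ [w]) = PySem.List.dedup K := by
  rw [PySem.List.dedup_eq_ofList, PySem.List.dedup_eq_ofList, PySem.Set.ofList_append_singleton]
  simp [PySem.Set.add, PySem.Set.mem_ofList, h]

theorem dedup_snoc_not_mem (K : List String) (w : String) (h : w ∉ K) :
    PySem.List.dedup (K ++ [w]) = PySem.List.dedup K ++ [w] := by
  rw [PySem.List.dedup_eq_ofList, PySem.List.dedup_eq_ofList, PySem.Set.ofList_append_singleton]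
  simp [PySem.Set.add, PySem.Set.mem_ofList, h]

-- the A-side characterisation: folding A's step gives exactly B's closed form
theorem A_char (L : List (String × String)) :
    L.foldl wtStepL PySem.Dict.empty = PySem.Dict.mk (wtC L) := by
  induction L using List.reverseRecOn with
  | nil => rfl
  | append_singleton L p ih =>
    obtain ⟨w, t⟩ := p
    rw [List.foldl_append, List.foldl_cons, List.foldl_nil, ih]
    have hget : (PySem.Dict.mk (wtC L)).get? w =
        if w ∈ PySem.List.dedup (L.map Prod.fst) then some (wtCollect w L) else none := by
      unfold wtC; exact get?_mk_map _ _ w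
    by_cases hmem : w ∈ L.map Prod.fst
    · have hgd : (PySem.Dict.mk (wtC L)).get? w = some (wtCollect w L) := by
        rw [hget, if_pos ((PySem.List.mem_dedup _ _).mpr hmem)]
      have hc : (PySem.Dict.mk (wtC L)).contains w = true := by
        rw [PySem.Dict.contains_eq_isSome_get?, hgd]; rfl
      have hcur : (PySem.Dict.mk (wtC L)).getD w [] = wtCollect w L := by
        rw [PySem.Dict.getD_eq_get?_getD, hgd]; rfl
      have hK : PySem.List.dedup ((L ++ [(w, t)]).map Prod.fst) = PySem.List.dedup (L.map Prod.fst) := by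
        rw [List.map_append]; exact dedup_snoc_mem _ _ hmem
      unfold wtStepL
      simp only [hc, if_true, hcur]
      by_cases ht : t ∈ wtCollect w L
      · rw [if_pos ht]
        congr 1
        unfold wtC
        rw [hK]
        refine (List.map_congr_left ?_).symm
        intro w' _
        rw [wtCollect_snoc]
        by_cases hw : w = w'
        · subst hw; simp [ht]
        · simp [hw]
      · rw [if_neg ht]
        apply PySem.Dict.ext
        rw [PySem.Dict.items_insert, if_pos hc]
        show (wtC L).map _ = wtC (L ++ [(w, t)])
        unfold wtC
        rw [hK, List.map_map]
        refine List.map_congr_left ?_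
        intro w' _
        by_cases hw : w = w'
        · subst hw
          simp only [Function.comp_apply, beq_self_eq_true, if_pos]
          rw [wtCollect_snoc]
          simp [ht]
        · have hb : ¬ (w' == w) = true := by simpa using Ne.symm hw
          simp only [Function.comp_apply, hb, Bool.false_eq_true, if_false]
          rw [wtCollect_snoc]
          simp [hw]
    · have hgd : (PySem.Dict.mk (wtC L)).get? w = none := by
        rw [hget, if_neg (fun hm => hmem ((PySem.List.mem_dedup _ _).mp hm))]
      have hc : (PySem.Dict.mk (wtC L)).contains w = false := by
        rw [PySem.Dict.contains_eq_isSome_get?, hgd]; rfl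
      unfold wtStepL
      simp only [hc, Bool.false_eq_true, if_false, PySem.Dict.getD_insert_self,
        List.not_mem_nil, List.nil_append, PySem.Dict.insert_insert_self]
      apply PySem.Dict.ext
      rw [PySem.Dict.items_insert, if_neg (by simp [hc])]
      show wtC L ++ [(w, [t])] = wtC (L ++ [(w, t)])
      unfold wtC
      simp only [List.map_append, List.map_cons, List.map_nil]
      rw [dedup_snoc_not_mem _ _ hmem, List.map_append]
      congr 1
      · refine (List.map_congr_left ?_).symm
        intro w' hw'
        have hw'K : w' ∈ L.map Prod.fst := (PySem.List.mem_dedup _ _).mp hw'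
        have hw : ¬ w = w' := fun he => hmem (he ▸ hw'K)
        rw [wtCollect_snoc]
        simp [hw]
      · simp only [List.map_cons, List.map_nil]
        rw [wtCollect_snoc, wtCollect_eq_nil w L hmem]
        simp

-- ===== VERDICT =====
theorem word_tags_spec : Claim_equal_word_tags := by
  intro train test _
  unfold Spec_word_tags word_tags word_tags_alt
  simp only [foldl_sen_flatten]
  rw [← List.foldl_append, ← List.flatten_append, foldA_lower, A_char]
  rfl
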